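-- pv_equiv track=rewrite | github.com/JissuPark/Algorithm | BOJ/10820.py | stranalyze
-- ===== SOURCE A (Python) =====
-- def stranalyze(s):
--     answer = []
--     for line in s:
--         upper = 0
--         lower = 0
--         number = 0
--         space = 0
--         for char in line[:-1]:
--             if char.isupper():
--                 upper += 1
--             elif char.islower():
--                 lower += 1
--             elif char.isdigit():
--                 number += 1
--             else:
--                 space += 1
--         answer.append([lower, upper, number, space])
--     return answer
-- ===== SOURCE B (Python) =====
-- def stranalyze(s):
--     out = []
--     for line in s:
--         freq = {}
--         for ch in line[:-1]:
--             freq[ch] = freq.get(ch, 0) + 1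
--         counts = [0, 0, 0, 0]
--         for ch, k in freq.items():
--             if ch.isupper():
--                 counts[1] += k
--             elif ch.islower():
--                 counts[0] += k
--             elif ch.isdigit():
--                 counts[2] += k
--             else:
--                 counts[3] += k
--         out.append(counts)
--     return out
-- ===== Notes on version B (the rewrite author's own statement) =====
-- stated objective: alternative
-- what changed: B first builds a character-frequency dictionary for each line body and then classifies each DISTINCT character once, adding its multiplicity to the matching counter in a 4-slot list, instead of A's direct per-character classifying loop over four scalar counters.
import Mathlib
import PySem

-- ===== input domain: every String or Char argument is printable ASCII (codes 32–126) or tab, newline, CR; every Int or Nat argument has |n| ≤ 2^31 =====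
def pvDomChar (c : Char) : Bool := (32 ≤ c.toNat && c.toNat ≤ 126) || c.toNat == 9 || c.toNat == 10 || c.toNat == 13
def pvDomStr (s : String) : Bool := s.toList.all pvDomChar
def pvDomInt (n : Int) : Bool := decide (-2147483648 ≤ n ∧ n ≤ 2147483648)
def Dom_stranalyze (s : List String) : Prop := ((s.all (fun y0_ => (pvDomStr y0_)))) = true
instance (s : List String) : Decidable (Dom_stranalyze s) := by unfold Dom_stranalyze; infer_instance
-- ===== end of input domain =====

-- B builds a per-line character-frequency dictionary and classifies each DISTINCT character once,
-- adding its multiplicity to a 4-slot counts list, instead of A's per-character classifying loop.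

-- ===== PORT A =====
-- one step of A's inner loop: the if/elif/elif/else chain over state (upper, lower, number, space)
def stranalyzeStep (st : Int × Int × Int × Int) (c : Char) : Int × Int × Int × Int :=
  if PySem.Chars.isupper c then (st.1 + 1, st.2.1, st.2.2.1, st.2.2.2)
  else if PySem.Chars.islower c then (st.1, st.2.1 + 1, st.2.2.1, st.2.2.2)
  else if PySem.Chars.isdigit c then (st.1, st.2.1, st.2.2.1 + 1, st.2.2.2)
  else (st.1, st.2.1, st.2.2.1, st.2.2.2 + 1)

-- A's body for one line: loop over line[:-1], then append [lower, upper, number, space]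
def stranalyzeLine (line : String) : List Int :=
  let r := ((PySem.Str.slice line none (some (-1))).toList).foldl stranalyzeStep (0, 0, 0, 0)
  [r.2.1, r.1, r.2.2.1, r.2.2.2]

def stranalyze (s : List String) : List (List Int) :=
  s.foldl (fun answer line => answer ++ [stranalyzeLine line]) []

-- ===== PORT B =====
-- Source B's inner item loop: counts[i] += k on the 4-slot list (indices 1,0,2,3 are always in range,
-- so List.set / getD is exact for Python's counts[i] += k)
def stranalyzeAltStep (cs : List Int) (p : Char × Int) : List Int :=
  if PySem.Chars.isupper p.1 then cs.set 1 (cs.getD 1 0 + p.2)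
  else if PySem.Chars.islower p.1 then cs.set 0 (cs.getD 0 0 + p.2)
  else if PySem.Chars.isdigit p.1 then cs.set 2 (cs.getD 2 0 + p.2)
  else cs.set 3 (cs.getD 3 0 + p.2)

-- Source B's body for one line: build freq via freq[ch] = freq.get(ch, 0) + 1, then fold over freq.items()
def stranalyzeAltLine (line : String) : List Int :=
  let body := (PySem.Str.slice line none (some (-1))).toList
  let freq := body.foldl (fun d c => d.insert c (d.getD c 0 + 1)) PySem.Dict.empty
  freq.items.foldl stranalyzeAltStep [0, 0, 0, 0]

def stranalyze_alt (s : List String) : List (List Int) :=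
  s.foldl (fun out line => out ++ [stranalyzeAltLine line]) []

-- ===== PRECONDITION & SPEC =====
def Spec_stranalyze (s : List String) (out : List (List Int)) : Prop := out = stranalyze_alt s
instance (s : List String) (out : List (List Int)) : Decidable (Spec_stranalyze s out) := by unfold Spec_stranalyze; infer_instance

-- ===== CLAIM (what is proved, stated in full; the proofs are below) =====
def Claim_equal_stranalyze : Prop := ∀ (s : List String), Dom_stranalyze s → Spec_stranalyze s (stranalyze s)

-- ===== LEMMAS AND PROOFS =====

-- the 'else' branch of both chains as a predicate
def pvOtherP (c : Char) : Bool :=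
  !(PySem.Chars.isupper c) && !(PySem.Chars.islower c) && !(PySem.Chars.isdigit c)

lemma pv_lower_not_upper (c : Char) (h : PySem.Chars.islower c = true) :
    PySem.Chars.isupper c = false := by
  simp [PySem.Chars.islower, PySem.Chars.isupper] at *
  intro hA
  exact lt_of_lt_of_le (by decide) h.1

lemma pv_digit_not_upper (c : Char) (h : PySem.Chars.isdigit c = true) :
    PySem.Chars.isupper c = false := by
  simp [PySem.Chars.isdigit, PySem.Chars.isupper] at *
  intro hA
  exact absurd (le_trans hA h.2) (by decide)

lemma pv_digit_not_lower (c : Char) (h : PySem.Chars.isdigit c = true) :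
    PySem.Chars.islower c = false := by
  simp [PySem.Chars.isdigit, PySem.Chars.islower] at *
  intro hA
  exact absurd (le_trans hA h.2) (by decide)

-- A's inner loop in closed form: each counter counts its own branch condition
lemma pv_A_loop (body : List Char) (u l n sp : Int) :
    body.foldl stranalyzeStep (u, l, n, sp) =
      (u + body.countP PySem.Chars.isupper,
       l + body.countP PySem.Chars.islower,
       n + body.countP PySem.Chars.isdigit,
       sp + body.countP pvOtherP) := by
  induction body generalizing u l n sp with
  | nil => simp
  | cons c rest ih =>
    simp only [List.foldl_cons, stranalyzeStep]
    split_ifs with h1 h2 h3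
    · have e2 : PySem.Chars.islower c = false := by
        cases h : PySem.Chars.islower c
        · rfl
        · exact absurd h1 (by simp [pv_lower_not_upper c h])
      have e3 : PySem.Chars.isdigit c = false := by
        cases h : PySem.Chars.isdigit c
        · rfl
        · exact absurd h1 (by simp [pv_digit_not_upper c h])
      rw [ih]
      simp [pvOtherP, h1, e2, e3]
      omega
    · have e3 : PySem.Chars.isdigit c = false := by
        cases h : PySem.Chars.isdigit c
        · rfl
        · exact absurd h2 (by simp [pv_digit_not_lower c h])
      rw [ih]
      simp [pvOtherP, h1, h2, e3]
      omega
    · rw [ih]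
      simp [pvOtherP, h1, h2, h3]
      omega
    · rw [ih]
      simp [pvOtherP, h1, h2, h3]
      omega

-- B's item loop in closed form over any list of (char, multiplicity) pairs
lemma pv_B_loop (l : List (Char × Int)) (a b c d : Int) :
    l.foldl stranalyzeAltStep [a, b, c, d] =
      [a + (l.map (fun q => if PySem.Chars.islower q.1 then q.2 else 0)).sum,
       b + (l.map (fun q => if PySem.Chars.isupper q.1 then q.2 else 0)).sum,
       c + (l.map (fun q => if PySem.Chars.isdigit q.1 then q.2 else 0)).sum,
       d + (l.map (fun q => if pvOtherP q.1 then q.2 else 0)).sum] := by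
  induction l generalizing a b c d with
  | nil => simp
  | cons q rest ih =>
    simp only [List.foldl_cons, stranalyzeAltStep]
    split_ifs with h1 h2 h3
    · have e2 : PySem.Chars.islower q.1 = false := by
        cases h : PySem.Chars.islower q.1
        · rfl
        · exact absurd h1 (by simp [pv_lower_not_upper _ h])
      have e3 : PySem.Chars.isdigit q.1 = false := by
        cases h : PySem.Chars.isdigit q.1
        · rfl
        · exact absurd h1 (by simp [pv_digit_not_upper _ h])
      simp only [List.set, List.getD]
      rw [ih]
      simp [pvOtherP, h1, e2, e3]
      omega
    · have e3 : PySem.Chars.isdigit q.1 = false := by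
        cases h : PySem.Chars.isdigit q.1
        · rfl
        · exact absurd h2 (by simp [pv_digit_not_lower _ h])
      simp only [List.set, List.getD]
      rw [ih]
      simp [pvOtherP, h1, h2, e3]
      omega
    · simp only [List.set, List.getD]
      rw [ih]
      simp [pvOtherP, h1, h2, h3]
      omega
    · simp only [List.set, List.getD]
      rw [ih]
      simp [pvOtherP, h1, h2, h3]
      omega

-- splitting the per-key sum when one more character is prepended to body
lemma pv_split (p : Char → Bool) (c : Char) (rest : List Char) (u : List Char) :
    (u.map (fun k => if p k then ((c :: rest).count k : Int) else 0)).sum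
      = (u.map (fun k => if p k then (rest.count k : Int) else 0)).sum
        + (u.map (fun k => if k = c ∧ p k then (1 : Int) else 0)).sum := by
  induction u with
  | nil => simp
  | cons x xs ihx =>
    simp only [List.map_cons, List.sum_cons]
    rw [ihx]
    have hx : (if p x then ((c :: rest).count x : Int) else 0)
        = (if p x then (rest.count x : Int) else 0) + (if x = c ∧ p x then (1 : Int) else 0) := by
      by_cases hp : p x
      · by_cases hc : x = c
        · subst hc; simp [hp]
        · simp [hp, hc, Ne.symm hc]
      · simp [hp]
    rw [hx]; ring

-- the indicator sum over a duplicate-free list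
lemma pv_indicator (p : Char → Bool) (c : Char) (u : List Char) (hu : u.Nodup) :
    (u.map (fun k => if k = c ∧ p k then (1 : Int) else 0)).sum
      = if c ∈ u ∧ p c then (1 : Int) else 0 := by
  induction u with
  | nil => simp
  | cons x xs ihx =>
    simp only [List.map_cons, List.sum_cons]
    rw [ihx (List.Nodup.of_cons hu)]
    by_cases hc : x = c
    · subst hc
      have hns : x ∉ xs := (List.nodup_cons.mp hu).1
      by_cases hp : p x <;> simp [hp, hns]
    · by_cases hm : c ∈ xs <;> simp [hc, hm, Ne.symm hc]

-- summing 'if p k then body.count k else 0' over a duplicate-free list u equals countP p of the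
-- part of body inside u
lemma pv_sum_counts (p : Char → Bool) (u : List Char) (hu : u.Nodup) (body : List Char) :
    (u.map (fun k => if p k then (body.count k : Int) else 0)).sum
      = ((body.filter (fun c => decide (c ∈ u))).countP p : Int) := by
  induction body with
  | nil => simp
  | cons c rest ih =>
    rw [pv_split, ih, pv_indicator p c u hu]
    by_cases hm : c ∈ u
    · by_cases hp : p c <;> simp [hm, hp]
    · simp [hm]

-- both per-line computations agree, over the explicit body list
lemma pv_line_core (body : List Char) :
    [(body.foldl stranalyzeStep (0, 0, 0, 0)).2.1, (body.foldl stranalyzeStep (0, 0, 0, 0)).1,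
     (body.foldl stranalyzeStep (0, 0, 0, 0)).2.2.1, (body.foldl stranalyzeStep (0, 0, 0, 0)).2.2.2]
      = ((body.foldl (fun d c => d.insert c (d.getD c 0 + 1)) PySem.Dict.empty).items).foldl
          stranalyzeAltStep [0, 0, 0, 0] := by
  rw [PySem.Dict.foldl_insert_getD_add_one_eq_counter, PySem.Dict.items_counter, pv_A_loop,
    pv_B_loop]
  have hmap : ∀ (p : Char → Bool),
      (((PySem.Set.ofList body).map (fun k => (k, (body.count k : Int)))).map
        (fun q => if p q.1 then q.2 else 0)).sum = (body.countP p : Int) := by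
    intro p
    rw [List.map_map]
    have h := pv_sum_counts p (PySem.Set.ofList body) (PySem.Set.nodup_ofList body) body
    simp only [Function.comp_def] at h ⊢
    rw [h]
    have hfe : List.filter (fun c => decide (c ∈ PySem.Set.ofList body)) body = body :=
      List.filter_eq_self.mpr (by intro a ha; simp [PySem.Set.mem_ofList, ha])
    rw [hfe]
  simp only [hmap]

lemma pv_line_eq (line : String) : stranalyzeLine line = stranalyzeAltLine line :=
  pv_line_core ((PySem.Str.slice line none (some (-1))).toList)

lemma pv_foldl_append (f : String → List Int) (s : List String) (acc : List (List Int)) :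
    s.foldl (fun answer line => answer ++ [f line]) acc = acc ++ s.map f := by
  induction s generalizing acc with
  | nil => simp
  | cons x xs ih => simp [ih]

-- ===== VERDICT (by name: the statement is the Claim_ definition above) =====
theorem stranalyze_spec : Claim_equal_stranalyze := by
  intro s _
  unfold Spec_stranalyze stranalyze stranalyze_alt
  rw [pv_foldl_append, pv_foldl_append]
  simp [pv_line_eq]
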